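-- pv_equiv track=rewrite | github.com/eronyako/FFRenameRegexGenerator | FFRenameRegexGeneratorGUI.py | regex_convert
-- ===== SOURCE A (Python) =====
-- def regex_convert(regex_list):
--     """
--     此函数用于正则表达式转换
--     :param regex_list: 正则表达式文件内容，str
--     :return: 批处理命令文件内容,str
--     """
--     # 去除换行符
--     i = 0
--     for v in regex_list:
--         regex_list[i] = v.strip()
--         i += 1
--
--     regex = []
--     i = 0
--     verify = False
--     for v in regex_list:
--         if v == '':
--             continue
--         elif v[0] == '#':
--             continue
--         elif v[0] == '(':
--             if not verify:
--                 regex.append([])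
--                 regex[i].append(v)
--                 verify = True
--             else:
--                 raise ValueError('不是有效的正则式列表')
--         else:
--             if verify:
--                 regex[i].append(v)
--                 i += 1
--                 verify = False
--             else:
--                 raise ValueError('不是有效的正则式列表')
--
--     # 生成 FFRename Pro 的正则表达式 frc 文件
--
--     date0 = 'CMD_A120220816'
--     date1 = 103514300
--
--     file0 = """;===========================================================
-- ;批处理命令文件
-- ;菲菲更名宝贝 之 得意非凡 (FFRename Professional)
-- ;菲菲的家(ffhome.com)版权所有
-- ;
-- ;说明：本文件为系统生成，除非明白各参数之意义，否则请不要随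
-- ;      意改动，以免影响原有的更名结果！
-- ;===========================================================
-- """
--
--     file1 = '[CommandList]\nCommandListCount=' + str(len(regex)) + '\n'
--     cmd_list = []
--     i = 1
--     while i <= len(regex):
--         cmd_list.append(date0 + str(date1))
--         file1 = file1 + str(i) + '=' + date0 + str(date1) + '\n'
--         i += 1
--         date1 += 1000
--
--     i = 0
--     file2 = ''
--     for v in cmd_list:
--         file2 = file2 + '\n[' + v + ']\nCMDComment=正则表达式更名\nCMDid=A101\nA1_Regex=1\nA1_RegexText=|'
--         file2 = file2 + regex[i][0] + '|\nA1_RegexReplaceText=|' + regex[i][1]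
--         file2 = file2 + '|\nA1_RegexIncludeExt=0\nA1_RegexReplaceAll=0\nA1_RegexReplaceSome=0\n' \
--                         'A1_RegexReplaceSomeText=1\nA1_RegexReplaceSomeGetOnly=1\n' \
--                         'A1_RegexReplaceSomeGetOnlyText=1\n'
--         i += 1
--
--     file = file0 + file1 + file2
--     return file
-- ===== SOURCE B (Python) =====
-- def regex_convert(regex_list):
--     """
--     此函数用于正则表达式转换 (alternative decomposition: filter + parity check + pairwise
--     grouping + joined comprehensions with closed-form numbering; mutates regex_list in
--     place exactly like the original)
--     """
--     # 去除换行符 (in-place, observable by the caller)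
--     for i in range(len(regex_list)):
--         regex_list[i] = regex_list[i].strip()
--
--     lines = [v for v in regex_list if v != '' and v[0] != '#']
--     for idx, v in enumerate(lines):
--         if (v[0] == '(') != (idx % 2 == 0):
--             raise ValueError('不是有效的正则式列表')
--     regex = [lines[k:k + 2] for k in range(0, len(lines), 2)]
--
--     date0 = 'CMD_A120220816'
--
--     file0 = """;===========================================================
-- ;批处理命令文件
-- ;菲菲更名宝贝 之 得意非凡 (FFRename Professional)
-- ;菲菲的家(ffhome.com)版权所有
-- ;
-- ;说明：本文件为系统生成，除非明白各参数之意义，否则请不要随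
-- ;      意改动，以免影响原有的更名结果！
-- ;===========================================================
-- """
--
--     n = len(regex)
--     file1 = ('[CommandList]\nCommandListCount=' + str(n) + '\n'
--              + ''.join(str(k + 1) + '=' + date0 + str(103514300 + 1000 * k) + '\n'
--                        for k in range(n)))
--     file2 = ''.join(
--         '\n[' + (date0 + str(103514300 + 1000 * k)) + ']\nCMDComment=正则表达式更名\nCMDid=A101\nA1_Regex=1\nA1_RegexText=|'
--         + regex[k][0] + '|\nA1_RegexReplaceText=|' + regex[k][1]
--         + '|\nA1_RegexIncludeExt=0\nA1_RegexReplaceAll=0\nA1_RegexReplaceSome=0\n'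
--           'A1_RegexReplaceSomeText=1\nA1_RegexReplaceSomeGetOnly=1\n'
--           'A1_RegexReplaceSomeGetOnlyText=1\n'
--         for k in range(n))
--     return file0 + file1 + file2
-- ===== Notes on version B (the rewrite author's own statement) =====
-- stated objective: simpler
-- what changed: Replaces A's single verify-flag state-machine loop and the two string-accumulating loops (a while loop threading an incrementing date counter and an indexed for loop) by a filtered list, a positional parity check, pairwise slicing into pairs, and two ''.join comprehensions with closed-form numbering (date = 103514300 + 1000*k).
import Mathlib
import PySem

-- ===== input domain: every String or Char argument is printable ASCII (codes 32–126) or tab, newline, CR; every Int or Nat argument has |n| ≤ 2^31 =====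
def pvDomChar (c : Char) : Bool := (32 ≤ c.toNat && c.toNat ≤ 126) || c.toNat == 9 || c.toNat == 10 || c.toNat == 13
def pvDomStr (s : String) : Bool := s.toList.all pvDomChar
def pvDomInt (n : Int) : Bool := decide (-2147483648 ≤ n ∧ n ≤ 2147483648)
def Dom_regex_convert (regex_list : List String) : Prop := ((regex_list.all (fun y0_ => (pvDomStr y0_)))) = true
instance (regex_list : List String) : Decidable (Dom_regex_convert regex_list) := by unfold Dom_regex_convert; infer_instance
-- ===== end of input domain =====

-- B replaces A's verify-state parsing loop and the two accumulating output loops by filter +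
-- parity validation + pairwise grouping + joined maps with closed-form numbering (objective:
-- simpler decomposition, same cost).  Both Pythons strip regex_list in place (identical
-- observable mutation); the equivalence proved is about the return value.  Where the Python
-- raises (outside Pre_), the ports return "".

-- shared line predicates (used by both ports and by Pre_)
def keepLine (v : String) : Bool := decide (¬ v = "" ∧ ¬ PySem.Str.pyGet? v 0 = some '#')
def startsParen (v : String) : Bool := decide (PySem.Str.pyGet? v 0 = some '(')

def pvDate0 : String := "CMD_A120220816"

def pvFile0 : String := ";===========================================================\n;批处理命令文件\n;菲菲更名宝贝 之 得意非凡 (FFRename Professional)\n;菲菲的家(ffhome.com)版权所有\n;\n;说明：本文件为系统生成，除非明白各参数之意义，否则请不要随\n;      意改动，以免影响原有的更名结果！\n;===========================================================\n"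

-- ===== PORT A =====

-- regex.append([]) then regex[i].append(v), or regex[i].append(v): append v to the list at index i
def appendAt (regex : List (List String)) (i : Nat) (v : String) : List (List String) :=
  regex.set i ((regex.getD i []) ++ [v])

-- A's parsing loop over state (regex, i, verify); none = ValueError (outside Pre_)
def parseA : List String → List (List String) → Nat → Bool → Option (List (List String))
  | [], regex, _, _ => some regex
  | v :: rest, regex, i, verify =>
    if v = "" then parseA rest regex i verify
    else if PySem.Str.pyGet? v 0 = some '#' then parseA rest regex i verify
    else if PySem.Str.pyGet? v 0 = some '(' then
      if !verify then parseA rest (appendAt (regex ++ [[]]) i v) i true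
      else none
    else
      if verify then parseA rest (appendAt regex i v) (i + 1) false
      else none

-- A's while loop building file1 and cmd_list (fuel = len(regex); i runs 1..len(regex))
def cmdLoopA : Nat → Int → Int → String → List String → String × List String
  | 0, _, _, file1, cmds => (file1, cmds)
  | fuel + 1, i, date1, file1, cmds =>
    cmdLoopA fuel (i + 1) (date1 + 1000)
      (file1 ++ PySem.Int.toStr i ++ "=" ++ pvDate0 ++ PySem.Int.toStr date1 ++ "\n")
      (cmds ++ [pvDate0 ++ PySem.Int.toStr date1])

-- A's file2 loop; regex[i][0] / regex[i][1] raise IndexError exactly where getD's default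
-- would be taken — those inputs are outside Pre_
def file2LoopA : List String → List (List String) → Nat → String → String
  | [], _, _, file2 => file2
  | v :: rest, regex, i, file2 =>
    file2LoopA rest regex (i + 1)
      (file2 ++ "\n[" ++ v ++ "]\nCMDComment=正则表达式更名\nCMDid=A101\nA1_Regex=1\nA1_RegexText=|"
        ++ ((regex.getD i []).getD 0 "") ++ "|\nA1_RegexReplaceText=|" ++ ((regex.getD i []).getD 1 "")
        ++ "|\nA1_RegexIncludeExt=0\nA1_RegexReplaceAll=0\nA1_RegexReplaceSome=0\nA1_RegexReplaceSomeText=1\nA1_RegexReplaceSomeGetOnly=1\nA1_RegexReplaceSomeGetOnlyText=1\n")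

def regex_convert (regex_list : List String) : String :=
  let stripped := regex_list.map PySem.Str.strip
  match parseA stripped [] 0 false with
  | none => ""  -- ValueError; outside Pre_
  | some regex =>
    let file1base := "[CommandList]\nCommandListCount=" ++ PySem.Int.toStr (regex.length : Int) ++ "\n"
    let fc := cmdLoopA regex.length 1 103514300 file1base []
    pvFile0 ++ fc.1 ++ file2LoopA fc.2 regex 0 ""

-- ===== PORT B =====

-- ''.join (exact for the empty separator)
def sjoin : List String → String
  | [] => ""
  | x :: rest => x ++ sjoin rest

-- [lines[k:k+2] for k in range(0, len(lines), 2)]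
def chunk2 : List String → List (List String)
  | [] => []
  | [a] => [[a]]
  | a :: b :: rest => [a, b] :: chunk2 rest

def blockB (regex : List (List String)) (k : Nat) : String :=
  "\n[" ++ (pvDate0 ++ PySem.Int.toStr (103514300 + 1000 * (k : Int)))
    ++ "]\nCMDComment=正则表达式更名\nCMDid=A101\nA1_Regex=1\nA1_RegexText=|"
    ++ ((regex.getD k []).getD 0 "") ++ "|\nA1_RegexReplaceText=|" ++ ((regex.getD k []).getD 1 "")
    ++ "|\nA1_RegexIncludeExt=0\nA1_RegexReplaceAll=0\nA1_RegexReplaceSome=0\nA1_RegexReplaceSomeText=1\nA1_RegexReplaceSomeGetOnly=1\nA1_RegexReplaceSomeGetOnlyText=1\n"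

def regex_convert_alt (regex_list : List String) : String :=
  let lines := (regex_list.map PySem.Str.strip).filter keepLine
  if (List.range lines.length).all (fun (idx : Nat) => startsParen (lines.getD idx "") == decide (idx % 2 = 0)) then
    let regex := chunk2 lines
    let n := regex.length
    let file1 := "[CommandList]\nCommandListCount=" ++ PySem.Int.toStr (n : Int) ++ "\n"
      ++ sjoin ((List.range n).map fun (k : Nat) =>
           PySem.Int.toStr ((k : Int) + 1) ++ "=" ++ pvDate0
             ++ PySem.Int.toStr (103514300 + 1000 * (k : Int)) ++ "\n")
    let file2 := sjoin ((List.range n).map (blockB regex))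
    pvFile0 ++ file1 ++ file2
  else ""  -- ValueError; outside Pre_

-- ===== PRECONDITION & SPEC =====

-- Pre_ excludes exactly the inputs where the Python A raises (ValueError on a kept line
-- breaking the '('/replacement alternation, IndexError on a trailing lone '('-line); B
-- raises there too.
def altPairs : List String → Bool
  | [] => true
  | [_] => false
  | a :: b :: rest => startsParen a && !startsParen b && altPairs rest

def Pre_regex_convert (regex_list : List String) : Prop :=
  altPairs ((regex_list.map PySem.Str.strip).filter keepLine) = true
instance (regex_list : List String) : Decidable (Pre_regex_convert regex_list) := by
  unfold Pre_regex_convert; infer_instance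

def pvWitness_regex_convert : List String :=
  ["(abc.*)", "xyz\\1", "", "# comment", " (d+) ", "n\\1"]

def Spec_regex_convert (regex_list : List String) (out : String) : Prop := out = regex_convert_alt regex_list
instance (regex_list : List String) (out : String) : Decidable (Spec_regex_convert regex_list out) := by unfold Spec_regex_convert; infer_instance

-- ===== CLAIM (what is proved, stated in full; the proofs are below) =====
def Claim_equal_regex_convert : Prop := ∀ (regex_list : List String), Dom_regex_convert regex_list → Pre_regex_convert regex_list → Spec_regex_convert regex_list (regex_convert regex_list)

-- ===== LEMMAS AND PROOFS =====

theorem appendAt_new (acc : List (List String)) (a : String) :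
    appendAt (acc ++ [[]]) acc.length a = acc ++ [[a]] := by
  induction acc with
  | nil => rfl
  | cons x xs ih => simp only [appendAt] at ih ⊢; simp

theorem appendAt_close (acc : List (List String)) (a b : String) :
    appendAt (acc ++ [[a]]) acc.length b = acc ++ [[a, b]] := by
  induction acc with
  | nil => rfl
  | cons x xs ih => simp only [appendAt] at ih ⊢; simp

-- A's parsing loop only looks at the kept lines
theorem parseA_filter (l : List String) : ∀ regex i verify,
    parseA l regex i verify = parseA (l.filter keepLine) regex i verify := by
  induction l with
  | nil => intro _ _ _; rfl
  | cons v rest ih =>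
    intro regex i verify
    by_cases h1 : v = ""
    · simp [parseA, h1, keepLine, ih]
    · by_cases h2 : PySem.List.pyGet? v.toList 0 = some '#'
      · simp [parseA, h1, h2, keepLine, ih]
      · by_cases h3 : PySem.List.pyGet? v.toList 0 = some '('
        · cases verify <;>
            simp [parseA, h1, h2, h3, keepLine, ih]
        · cases verify <;>
            simp [parseA, h1, h2, h3, keepLine, ih]

-- on an alternating list of kept lines, A's parse produces the pairwise chunks
theorem parseA_chunk2 (L : List String) : ∀ acc, altPairs L = true →
    (∀ v ∈ L, keepLine v = true) →
    parseA L acc acc.length false = some (acc ++ chunk2 L) := by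
  induction L using chunk2.induct with
  | case1 => intro acc _ _; simp [parseA, chunk2]
  | case2 a => intro acc h _; simp [altPairs] at h
  | case3 a b rest ih =>
    intro acc h hkeep
    simp only [altPairs, Bool.and_eq_true, Bool.not_eq_true'] at h
    obtain ⟨⟨ha, hb⟩, hrest⟩ := h
    have hka : ¬ a = "" ∧ ¬ PySem.List.pyGet? a.toList 0 = some '#' := by
      have := hkeep a (by simp); simpa [keepLine] using this
    have hkb : ¬ b = "" ∧ ¬ PySem.List.pyGet? b.toList 0 = some '#' := by
      have := hkeep b (by simp); simpa [keepLine] using this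
    have ha2 : PySem.List.pyGet? a.toList 0 = some '(' := by simpa [startsParen] using ha
    have hb2 : ¬ PySem.List.pyGet? b.toList 0 = some '(' := by simpa [startsParen] using hb
    have step1 : parseA (a :: b :: rest) acc acc.length false
        = parseA (b :: rest) (acc ++ [[a]]) acc.length true := by
      simp [parseA, hka.1, ha2, appendAt_new]
    have step2 : parseA (b :: rest) (acc ++ [[a]]) acc.length true
        = parseA rest (acc ++ [[a, b]]) (acc.length + 1) false := by
      simp [parseA, hkb.1, hkb.2, hb2, appendAt_close]
    rw [step1, step2]
    have hlen : acc.length + 1 = (acc ++ [[a, b]]).length := by simp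
    rw [hlen, ih (acc ++ [[a, b]]) hrest (fun v hv => hkeep v (by simp [hv]))]
    simp [chunk2]

-- closed form of A's while loop
theorem cmdLoopA_eq (n : Nat) : ∀ (i d : Int) (s : String) (cmds : List String),
    cmdLoopA n i d s cmds =
      (s ++ sjoin ((List.range n).map fun (k : Nat) =>
          PySem.Int.toStr (i + (k : Int)) ++ "=" ++ pvDate0
            ++ PySem.Int.toStr (d + 1000 * (k : Int)) ++ "\n"),
       cmds ++ (List.range n).map fun (k : Nat) => pvDate0 ++ PySem.Int.toStr (d + 1000 * (k : Int))) := by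
  induction n with
  | zero => intro i d s cmds; simp [cmdLoopA, sjoin]
  | succ n ih =>
    intro i d s cmds
    have hshift1 : ((List.range n).map fun (k : Nat) =>
        PySem.Int.toStr ((i + 1) + (k : Int)) ++ "=" ++ pvDate0
          ++ PySem.Int.toStr ((d + 1000) + 1000 * (k : Int)) ++ "\n")
        = ((List.range n).map fun (k : Nat) =>
        PySem.Int.toStr (i + ((k : Int) + 1)) ++ "=" ++ pvDate0
          ++ PySem.Int.toStr (d + 1000 * ((k : Int) + 1)) ++ "\n") := by
      apply List.map_congr_left; intro k _
      have e1 : (i + 1) + (k : Int) = i + ((k : Int) + 1) := by ring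
      have e2 : (d + 1000) + 1000 * (k : Int) = d + 1000 * ((k : Int) + 1) := by ring
      rw [e1, e2]
    have hshift2 : ((List.range n).map fun (k : Nat) =>
        pvDate0 ++ PySem.Int.toStr ((d + 1000) + 1000 * (k : Int)))
        = ((List.range n).map fun (k : Nat) =>
        pvDate0 ++ PySem.Int.toStr (d + 1000 * ((k : Int) + 1))) := by
      apply List.map_congr_left; intro k _
      have e2 : (d + 1000) + 1000 * (k : Int) = d + 1000 * ((k : Int) + 1) := by ring
      rw [e2]
    simp only [cmdLoopA, ih, hshift1, hshift2]
    rw [List.range_succ_eq_map]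
    simp only [List.map_cons, List.map_map, Function.comp_def, sjoin, Nat.succ_eq_add_one,
      Nat.cast_add, Nat.cast_one, Nat.cast_zero, add_zero, mul_zero]
    refine Prod.ext ?_ ?_ <;> simp [String.append_assoc]

-- closed form of A's file2 loop on the generated command-name list
theorem file2LoopA_blocks (regex : List (List String)) (n : Nat) : ∀ (i : Nat) (s : String),
    file2LoopA ((List.range n).map fun (k : Nat) =>
        pvDate0 ++ PySem.Int.toStr (103514300 + 1000 * ((i : Int) + (k : Int)))) regex i s
      = s ++ sjoin ((List.range n).map fun (k : Nat) => blockB regex (i + k)) := by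
  induction n with
  | zero => intro i s; simp [file2LoopA, sjoin]
  | succ n ih =>
    intro i s
    have hshiftN : ((List.range n).map fun (k : Nat) =>
        pvDate0 ++ PySem.Int.toStr (103514300 + 1000 * (((i + 1 : Nat) : Int) + (k : Int))))
        = ((List.range n).map fun (k : Nat) =>
        pvDate0 ++ PySem.Int.toStr (103514300 + 1000 * ((i : Int) + ((k : Int) + 1)))) := by
      apply List.map_congr_left; intro k _
      have e : (((i + 1 : Nat) : Int) + (k : Int)) = ((i : Int) + ((k : Int) + 1)) := by push_cast; ring
      rw [e]
    have hshiftB : ((List.range n).map fun (k : Nat) => blockB regex ((i + 1) + k))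
        = ((List.range n).map fun (k : Nat) => blockB regex (i + (k + 1))) := by
      apply List.map_congr_left; intro k _
      have e : ((i + 1) + k : Nat) = (i + (k + 1) : Nat) := by omega
      rw [e]
    rw [List.range_succ_eq_map]
    simp only [List.map_cons, List.map_map, Function.comp_def, Nat.succ_eq_add_one,
      Nat.cast_add, Nat.cast_one, Nat.cast_zero, add_zero]
    simp only [file2LoopA]
    rw [show ((List.range n).map fun (k : Nat) =>
        pvDate0 ++ PySem.Int.toStr (103514300 + 1000 * ((i : Int) + ((k : Int) + 1))))
        = ((List.range n).map fun (k : Nat) =>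
        pvDate0 ++ PySem.Int.toStr (103514300 + 1000 * (((i + 1 : Nat) : Int) + (k : Int)))) from hshiftN.symm]
    rw [ih (i + 1)]
    simp only [sjoin, hshiftB.symm]
    simp [blockB, String.append_assoc]

-- alternation gives the positional parity B checks
theorem altPairs_parity (L : List String) (h : altPairs L = true) :
    ∀ idx < L.length, startsParen (L.getD idx "") = decide (idx % 2 = 0) := by
  induction L using chunk2.induct with
  | case1 => intro idx hidx; simp at hidx
  | case2 a => simp [altPairs] at h
  | case3 a b rest ih =>
    simp only [altPairs, Bool.and_eq_true, Bool.not_eq_true'] at h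
    obtain ⟨⟨ha, hb⟩, hrest⟩ := h
    intro idx hidx
    match idx with
    | 0 => simpa using ha
    | 1 => simpa using hb
    | (k + 2) =>
      have hk : k < rest.length := by simp at hidx; omega
      have := ih hrest k hk
      have e : (k + 2) % 2 = k % 2 := by omega
      simpa [List.getD_cons_succ, e] using this

theorem altPairs_guard (L : List String) (h : altPairs L = true) :
    (List.range L.length).all
      (fun (idx : Nat) => startsParen (L.getD idx "") == decide (idx % 2 = 0)) = true := by
  rw [List.all_eq_true]
  intro idx hidx
  rw [List.mem_range] at hidx
  have hp := altPairs_parity L h idx hidx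
  rw [List.getD_eq_getElem?_getD] at hp
  simp [hp]

-- ===== VERDICT (by name: the statement is the Claim_ definition above) =====
theorem regex_convert_spec : Claim_equal_regex_convert := by
  intro rl _dom pre
  unfold Spec_regex_convert
  unfold Pre_regex_convert at pre
  unfold regex_convert regex_convert_alt
  set L := (rl.map PySem.Str.strip).filter keepLine with hL
  have hkeep : ∀ v ∈ L, keepLine v = true := fun v hv => List.of_mem_filter hv
  have hparse : parseA (rl.map PySem.Str.strip) [] 0 false = some (chunk2 L) := by
    rw [parseA_filter, ← hL]
    simpa using parseA_chunk2 L [] pre hkeep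
  simp only [hparse, altPairs_guard L pre, if_true, cmdLoopA_eq, List.nil_append]
  have h0 : ((List.range (chunk2 L).length).map fun (k : Nat) =>
      pvDate0 ++ PySem.Int.toStr (103514300 + 1000 * (k : Int)))
      = ((List.range (chunk2 L).length).map fun (k : Nat) =>
      pvDate0 ++ PySem.Int.toStr (103514300 + 1000 * (((0 : Nat) : Int) + (k : Int)))) := by
    apply List.map_congr_left; intro k _; norm_num
  rw [h0, file2LoopA_blocks, String.empty_append]
  have h1 : ((List.range (chunk2 L).length).map fun (k : Nat) =>
      PySem.Int.toStr ((1 : Int) + (k : Int)) ++ "=" ++ pvDate0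
        ++ PySem.Int.toStr (103514300 + 1000 * (k : Int)) ++ "\n")
      = ((List.range (chunk2 L).length).map fun (k : Nat) =>
      PySem.Int.toStr ((k : Int) + 1) ++ "=" ++ pvDate0
        ++ PySem.Int.toStr (103514300 + 1000 * (k : Int)) ++ "\n") := by
    apply List.map_congr_left; intro k _; rw [Int.add_comm]
  have h2 : ((List.range (chunk2 L).length).map fun (k : Nat) => blockB (chunk2 L) (0 + k))
      = ((List.range (chunk2 L).length).map (blockB (chunk2 L))) := by
    apply List.map_congr_left; intro k _; rw [Nat.zero_add]
  rw [h1, h2]
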